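-- pv_equiv track=rewrite | github.com/whanyu1212/mental-gym | src/kattis/python/subaruba.py | process_text_ubbi_dubbi
-- ===== SOURCE A (Python) =====
-- def process_text_ubbi_dubbi(text: str, vowel_list: set, mode: str) -> str:
--     """Process the string of text to convert to Ubbi Dubbi language or vice versa.
--
--     Args:
--         text (str): string of text to be processed (may or may not contain vowels)
--         vowel_list (set): aeiouyAEIOUY
--         mode (str): 'D' for English to Ubbi Dubbi, 'A' for Ubbi Dubbi to English
--
--     Returns:
--         str: processed text
--     """
--     output = []
--
--     if mode == "D":
--         for i in text:
--             if i in vowel_list and i.islower():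
--                 output.append("ub" + i)
--             elif i in vowel_list and i.isupper():
--                 output.append("Ub" + i.lower())
--             else:
--                 output.append(i)
--     elif mode == "A":
--         i = 0
--         while i < len(text):
--             if (
--                 i + 2 < len(text)
--                 and text[i : i + 2] in {"ub", "Ub"}
--                 and text[i + 2] in vowel_list
--             ):
--                 if text[i : i + 2] == "ub":
--                     output.append(text[i + 2])
--                 elif text[i : i + 2] == "Ub":
--                     output.append(text[i + 2].upper())
--                 i += 3
--             else:
--                 output.append(text[i])
--                 i += 1
--     return "".join(output)
-- ===== SOURCE B (Python) =====
-- def process_text_ubbi_dubbi(text: str, vowel_list: set, mode: str) -> str: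
--     """Table-driven encode / stack-driven decode re-implementation."""
--     if mode == "D":
--         table = {v: ("ub" + v if v.islower() else "Ub" + v.lower() if v.isupper() else v)
--                  for v in vowel_list if len(v) == 1}
--         return "".join(table.get(c, c) for c in text)
--     if mode == "A":
--         out = []
--         stack = list(reversed(text))
--         while stack:
--             c = stack.pop()
--             if (c == 'u' or c == 'U') and len(stack) >= 2 and stack[-1] == 'b' and stack[-2] in vowel_list:
--                 stack.pop()
--                 v = stack.pop()
--                 out.append(v if c == 'u' else v.upper())
--             else:
--                 out.append(c)
--         return "".join(out)
--     return ""
-- ===== Notes on version B (the rewrite author's own statement) =====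
-- stated objective: idiomatic
-- what changed: Encoding now builds a translation table from vowel_list once and maps each character through a single dict lookup, and decoding replaces the index/slice while-loop with a stack scan that pattern-consumes 'ub'/'Ub'+vowel triples from the front.
import Mathlib
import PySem

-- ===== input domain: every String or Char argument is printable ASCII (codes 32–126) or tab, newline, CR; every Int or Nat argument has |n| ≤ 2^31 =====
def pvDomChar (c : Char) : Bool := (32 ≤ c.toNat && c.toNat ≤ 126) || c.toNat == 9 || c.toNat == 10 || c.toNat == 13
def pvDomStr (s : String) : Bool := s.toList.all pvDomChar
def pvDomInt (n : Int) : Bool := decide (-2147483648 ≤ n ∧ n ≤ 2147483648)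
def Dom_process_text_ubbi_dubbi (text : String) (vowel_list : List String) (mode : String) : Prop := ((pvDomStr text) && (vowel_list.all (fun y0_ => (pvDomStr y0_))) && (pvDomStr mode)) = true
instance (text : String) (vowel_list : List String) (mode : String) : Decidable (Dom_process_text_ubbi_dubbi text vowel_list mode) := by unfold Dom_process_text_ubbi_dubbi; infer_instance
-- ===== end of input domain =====

-- B re-implements the encoder as a translation table built once from vowel_list plus a single
-- lookup pass, and the decoder as a pattern-consuming stack scan instead of A's index/slice
-- while-loop (objective: idiomatic/alternative, same asymptotic cost).

-- ===== PORT A =====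
-- A's while-loop of mode "A": i advances by 3 on a match, by 1 otherwise; output appended in order.
def pvAWhile (t : List Char) (vl : List String) (i : Nat) : List String :=
  if _h : i < t.length then
    if i + 2 < t.length
        ∧ (PySem.List.slice t (some (i : Int)) (some ((i : Int) + 2)) = ['u', 'b']
           ∨ PySem.List.slice t (some (i : Int)) (some ((i : Int) + 2)) = ['U', 'b'])
        ∧ vl.contains (String.ofList [PySem.List.pyGetD t ((i : Int) + 2) ' ']) then
      (if PySem.List.slice t (some (i : Int)) (some ((i : Int) + 2)) = ['u', 'b'] then
         String.ofList [PySem.List.pyGetD t ((i : Int) + 2) ' ']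
       else
         String.ofList [PySem.Chars.upperChar (PySem.List.pyGetD t ((i : Int) + 2) ' ')])
        :: pvAWhile t vl (i + 3)
    else
      String.ofList [PySem.List.pyGetD t (i : Int) ' '] :: pvAWhile t vl (i + 1)
  else []
termination_by t.length - i

def process_text_ubbi_dubbi (text : String) (vowel_list : List String) (mode : String) : String :=
  let t := text.toList
  let output : List String :=
    if mode = "D" then
      t.foldl (fun out i =>
        if vowel_list.contains (String.ofList [i]) ∧ PySem.Chars.islower i then
          out ++ ["ub" ++ String.ofList [i]]
        else if vowel_list.contains (String.ofList [i]) ∧ PySem.Chars.isupper i then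
          out ++ ["Ub" ++ String.ofList [PySem.Chars.lowerChar i]]
        else
          out ++ [String.ofList [i]]) []
    else if mode = "A" then
      pvAWhile t vowel_list 0
    else []
  PySem.Str.join "" output

-- ===== PORT B =====
-- value stored in B's translation table for a one-character vowel string v
def pvEnc (v : String) : String :=
  let c := v.toList.headD ' '
  if PySem.Chars.islower c then "ub" ++ v
  else if PySem.Chars.isupper c then "Ub" ++ PySem.Str.lower v
  else v

-- B's dict comprehension: {v: enc(v) for v in vowel_list if len(v) == 1}
def pvTable (vl : List String) : PySem.Dict String String :=
  (vl.filter (fun v => PySem.Str.len v == 1)).foldl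
    (fun d v => d.insert v (pvEnc v)) PySem.Dict.empty

-- B's decode loop: the stack holds the not-yet-consumed characters (front = top of stack)
def pvBDecode (vl : List String) : List Char → List String
  | c :: b :: v :: rest =>
    if (c = 'u' ∨ c = 'U') ∧ b = 'b' ∧ vl.contains (String.ofList [v]) then
      (if c = 'u' then String.ofList [v] else String.ofList [PySem.Chars.upperChar v])
        :: pvBDecode vl rest
    else
      String.ofList [c] :: pvBDecode vl (b :: v :: rest)
  | c :: rest => String.ofList [c] :: pvBDecode vl rest
  | [] => []

def process_text_ubbi_dubbi_alt (text : String) (vowel_list : List String) (mode : String) : String :=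
  if mode = "D" then
    PySem.Str.join "" (text.toList.map (fun c =>
      (pvTable vowel_list).getD (String.ofList [c]) (String.ofList [c])))
  else if mode = "A" then
    PySem.Str.join "" (pvBDecode vowel_list text.toList)
  else ""

-- ===== PRECONDITION & SPEC =====
def Spec_process_text_ubbi_dubbi (text : String) (vowel_list : List String) (mode : String) (out : String) : Prop := out = process_text_ubbi_dubbi_alt text vowel_list mode
instance (text : String) (vowel_list : List String) (mode : String) (out : String) : Decidable (Spec_process_text_ubbi_dubbi text vowel_list mode out) := by unfold Spec_process_text_ubbi_dubbi; infer_instance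

-- ===== CLAIM (what is proved, stated in full; the proofs are below) =====
def Claim_equal_process_text_ubbi_dubbi : Prop := ∀ (text : String) (vowel_list : List String) (mode : String), Dom_process_text_ubbi_dubbi text vowel_list mode → Spec_process_text_ubbi_dubbi text vowel_list mode (process_text_ubbi_dubbi text vowel_list mode)

-- ===== LEMMAS AND PROOFS =====

-- lookup in a key-determined insert-fold
theorem pv_getD_foldl_insert (l : List String) (d : PySem.Dict String String)
    (g : String → String) (k dflt : String) :
    ((l.foldl (fun d v => d.insert v (g v)) d).getD k dflt)
      = if k ∈ l then g k else d.getD k dflt := by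
  induction l generalizing d with
  | nil => simp
  | cons v rest ih =>
    simp only [List.foldl_cons, ih, PySem.Dict.getD_insert, List.mem_cons]
    by_cases hr : k ∈ rest <;> by_cases hv : k = v <;> simp [hr, hv]

theorem pv_lower_single (c : Char) :
    PySem.Str.lower (String.ofList [c]) = String.ofList [PySem.Chars.lowerChar c] := by
  simp [PySem.Str.lower, PySem.Chars.lower]

-- pointwise value of B's table = A's branch for character c
theorem pv_table_getD (vl : List String) (c : Char) :
    (pvTable vl).getD (String.ofList [c]) (String.ofList [c])
      = (if vl.contains (String.ofList [c]) ∧ PySem.Chars.islower c then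
           "ub" ++ String.ofList [c]
         else if vl.contains (String.ofList [c]) ∧ PySem.Chars.isupper c then
           "Ub" ++ String.ofList [PySem.Chars.lowerChar c]
         else String.ofList [c]) := by
  unfold pvTable
  rw [pv_getD_foldl_insert]
  have hlen : (PySem.Str.len (String.ofList [c]) == (1 : Int)) = true := by
    simp [PySem.Str.len]
  have hmem : (String.ofList [c] ∈ vl.filter (fun v => PySem.Str.len v == 1)) ↔
      String.ofList [c] ∈ vl := by
    simp [List.mem_filter, PySem.Str.len]
  by_cases h : String.ofList [c] ∈ vl
  · rw [if_pos (hmem.mpr h)]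
    unfold pvEnc
    simp only [String.toList_ofList, List.headD_cons]
    have hc : vl.contains (String.ofList [c]) = true := by
      simpa using h
    by_cases hl : PySem.Chars.islower c
    · simp [hl, h]
    · by_cases hu : PySem.Chars.isupper c
      · simp [hl, hu, h, pv_lower_single]
      · simp [hl, hu, h]
  · rw [if_neg (fun hm => h (hmem.mp hm))]
    simp [h, PySem.Dict.getD_empty]

-- mode "D": A's append-loop equals B's table-lookup map
theorem pv_modeD (t : List Char) (vl : List String) :
    t.foldl (fun out i =>
        if vl.contains (String.ofList [i]) ∧ PySem.Chars.islower i then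
          out ++ ["ub" ++ String.ofList [i]]
        else if vl.contains (String.ofList [i]) ∧ PySem.Chars.isupper i then
          out ++ ["Ub" ++ String.ofList [PySem.Chars.lowerChar i]]
        else
          out ++ [String.ofList [i]]) []
      = t.map (fun c => (pvTable vl).getD (String.ofList [c]) (String.ofList [c])) := by
  have hfun : (fun (out : List String) (i : Char) =>
      if vl.contains (String.ofList [i]) ∧ PySem.Chars.islower i then
        out ++ ["ub" ++ String.ofList [i]]
      else if vl.contains (String.ofList [i]) ∧ PySem.Chars.isupper i then
        out ++ ["Ub" ++ String.ofList [PySem.Chars.lowerChar i]]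
      else
        out ++ [String.ofList [i]])
      = (fun out i => out ++ [(pvTable vl).getD (String.ofList [i]) (String.ofList [i])]) := by
    funext out i
    rw [pv_table_getD]
    split_ifs <;> rfl
  rw [hfun, PySem.List.foldl_append_singleton_eq_map]
  simp

theorem pv_slice_two (t : List Char) (i : Nat) (h : i + 1 < t.length) :
    PySem.List.slice t (some (i : Int)) (some ((i : Int) + 2)) = [t[i], t[i + 1]] := by
  have h2 : ((i : Int) + 2) = ((i + 2 : Nat) : Int) := by push_cast; ring
  rw [h2, PySem.List.slice_natCast]
  have h3 : i + 2 - i = 2 := by omega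
  rw [h3, List.drop_eq_getElem_cons (by omega), List.drop_eq_getElem_cons h]
  rfl

theorem pv_pyGetD_at (t : List Char) (i : Nat) (h : i < t.length) :
    PySem.List.pyGetD t (i : Int) ' ' = t[i] := by
  rw [PySem.List.pyGetD_eq_getElem t ' ' (by omega) (by exact_mod_cast h)]
  simp

theorem pv_pyGetD_at2 (t : List Char) (i : Nat) (h : i + 2 < t.length) :
    PySem.List.pyGetD t ((i : Int) + 2) ' ' = t[i + 2] := by
  have h2 : ((i : Int) + 2) = ((i + 2 : Nat) : Int) := by push_cast; ring
  rw [h2, pv_pyGetD_at t (i + 2) h]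

-- mode "A": A's index scan from position i equals B's stack scan of the remaining suffix
theorem pv_modeA (t : List Char) (vl : List String) :
    ∀ n i, t.length - i ≤ n → pvAWhile t vl i = pvBDecode vl (t.drop i) := by
  intro n
  induction n with
  | zero =>
    intro i hi
    have hge : t.length ≤ i := by omega
    rw [pvAWhile, dif_neg (by omega), List.drop_eq_nil_of_le hge, pvBDecode]
  | succ n ih =>
    intro i hi
    by_cases hlt : i < t.length
    · rw [pvAWhile, dif_pos hlt]
      by_cases h3 : i + 2 < t.length
      · -- at least three characters remain
        have hd : t.drop i = t[i] :: t[i + 1] :: t[i + 2] :: t.drop (i + 3) := by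
          rw [List.drop_eq_getElem_cons (by omega), List.drop_eq_getElem_cons (by omega),
            List.drop_eq_getElem_cons (by omega)]
        rw [pv_slice_two t i (by omega), pv_pyGetD_at2 t i h3, hd, pvBDecode]
        have hub : ([t[i], t[i + 1]] = ['u', 'b'] ↔ t[i] = 'u' ∧ t[i + 1] = 'b') := by
          simp
        have hUb : ([t[i], t[i + 1]] = ['U', 'b'] ↔ t[i] = 'U' ∧ t[i + 1] = 'b') := by
          simp
        by_cases hcond : (t[i] = 'u' ∨ t[i] = 'U') ∧ t[i + 1] = 'b'
              ∧ vl.contains (String.ofList [t[i + 2]])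
        · obtain ⟨hcu, hb, hv⟩ := hcond
          have hslice : [t[i], t[i + 1]] = ['u', 'b'] ∨ [t[i], t[i + 1]] = ['U', 'b'] := by
            rcases hcu with h | h
            · exact Or.inl (hub.mpr ⟨h, hb⟩)
            · exact Or.inr (hUb.mpr ⟨h, hb⟩)
          have hA : i + 2 < t.length
              ∧ ([t[i], t[i + 1]] = ['u', 'b'] ∨ [t[i], t[i + 1]] = ['U', 'b'])
              ∧ vl.contains (String.ofList [t[i + 2]]) = true := ⟨h3, hslice, hv⟩
          have hB : (t[i] = 'u' ∨ t[i] = 'U') ∧ t[i + 1] = 'b'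
              ∧ vl.contains (String.ofList [t[i + 2]]) = true := ⟨hcu, hb, hv⟩
          rw [if_pos hA, if_pos hB, ih (i + 3) (by omega)]
          rcases hcu with h | h
          · rw [if_pos (hub.mpr ⟨h, hb⟩), if_pos h]
          · have hne : t[i] ≠ 'u' := by rw [h]; decide
            rw [if_neg (fun he => hne (hub.mp he).1), if_neg hne]
        · have hnegA : ¬(i + 2 < t.length
              ∧ ([t[i], t[i + 1]] = ['u', 'b'] ∨ [t[i], t[i + 1]] = ['U', 'b'])
              ∧ vl.contains (String.ofList [t[i + 2]])) := by
            rintro ⟨-, hsl, hv⟩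
            apply hcond
            rcases hsl with h | h
            · obtain ⟨h1, h2⟩ := hub.mp h; exact ⟨Or.inl h1, h2, hv⟩
            · obtain ⟨h1, h2⟩ := hUb.mp h; exact ⟨Or.inr h1, h2, hv⟩
          rw [if_neg hnegA, if_neg hcond, pv_pyGetD_at t i hlt, ih (i + 1) (by omega)]
          have hdrop1 : t.drop (i + 1) = t[i + 1] :: t[i + 2] :: t.drop (i + 3) := by
            rw [List.drop_eq_getElem_cons (by omega), List.drop_eq_getElem_cons (by omega)]
          rw [hdrop1]
      · -- one or two characters remain: A's compound condition is false, B's catch-all fires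
        rw [if_neg (by rintro ⟨hc, -, -⟩; omega), pv_pyGetD_at t i hlt,
          ih (i + 1) (by omega), List.drop_eq_getElem_cons hlt]
        have hlen : t.length = i + 1 ∨ t.length = i + 2 := by omega
        rcases hlen with h | h
        · have hnil : t.drop (i + 1) = [] := List.drop_eq_nil_of_le (by omega)
          rw [hnil]
          simp [pvBDecode]
        · have hone : t.drop (i + 1) = [t[i + 1]] := by
            rw [List.drop_eq_getElem_cons (by omega), List.drop_eq_nil_of_le (by omega)]
          rw [hone]
          simp [pvBDecode]
    · rw [pvAWhile, dif_neg hlt, List.drop_eq_nil_of_le (by omega), pvBDecode]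

-- ===== VERDICT (by name: the statement is the Claim_ definition above) =====
theorem process_text_ubbi_dubbi_spec : Claim_equal_process_text_ubbi_dubbi := by
  intro text vowel_list mode _
  unfold Spec_process_text_ubbi_dubbi process_text_ubbi_dubbi process_text_ubbi_dubbi_alt
  by_cases hD : mode = "D"
  · subst hD
    simp only [reduceIte]
    rw [pv_modeD]
  · by_cases hA : mode = "A"
    · subst hA
      simp only [reduceIte]
      rw [pv_modeA text.toList vowel_list (text.toList.length) 0 (by omega), List.drop_zero,
        if_neg hD]
      rw [if_neg hD]
    · simp only [if_neg hD, if_neg hA]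
      rfl
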